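-- pv_equiv track=rewrite | github.com/catsymptote/RCubeSolver | cube.py | face_flip
-- ===== SOURCE A (Python) =====
-- def face_flip(face):
--     tmpList = face[:]
--     for i in range(9):
--         face[i] = tmpList[9 -1 -i]
--     """
--     face[0] = tmpList[8]
--     face[1] = tmpList[7]
--     face[2] = tmpList[6]
--
--     face[3] = tmpList[5]
--     face[4] = tmpList[4]
--     face[5] = tmpList[3]
--
--     face[6] = tmpList[2]
--     face[7] = tmpList[1]
--     face[8] = tmpList[0]
--     """
--
--     return face
-- ===== SOURCE B (Python) =====
-- def face_flip(face):
--     # Two-pointer in-place reversal of the 9-element face: swap ends inward,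
--     # no temporary copy of the list.
--     for i in range(4):
--         face[i], face[8 - i] = face[8 - i], face[i]
--     return face
-- ===== Notes on version B (the rewrite author's own statement) =====
-- stated objective: simpler
-- what changed: Replaces the full-copy-and-reindex loop (9 assignments from a duplicated list) with an in-place two-pointer swap over the first four indices, removing the temporary buffer.
import Mathlib
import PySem

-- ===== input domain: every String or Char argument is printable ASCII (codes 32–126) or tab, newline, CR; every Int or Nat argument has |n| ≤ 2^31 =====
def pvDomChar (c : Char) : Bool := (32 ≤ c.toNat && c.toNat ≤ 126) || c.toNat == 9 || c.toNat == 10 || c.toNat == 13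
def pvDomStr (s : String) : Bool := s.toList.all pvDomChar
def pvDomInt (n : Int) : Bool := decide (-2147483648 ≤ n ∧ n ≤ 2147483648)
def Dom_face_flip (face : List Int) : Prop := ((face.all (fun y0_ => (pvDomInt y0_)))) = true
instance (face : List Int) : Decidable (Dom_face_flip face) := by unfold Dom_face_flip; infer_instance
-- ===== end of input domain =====

-- B reverses the 9-element face in place by a two-pointer swap (4 pairwise swaps,
-- no temporary copy) instead of A's full-copy-and-reindex loop; same return value,
-- same in-place mutation of the first 9 slots (equivalence proved about the return value).


-- ===== PORT A =====
-- tmpList = face[:]; for i in range(9): face[i] = tmpList[9-1-i]; return face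
def face_flip (face : List Int) : List Int :=
  let tmpList := face
  (PySem.List.pyRange 0 9 1).foldl (fun f i =>
    match PySem.List.pyGet? tmpList (9 - 1 - i) with
    | some v => f.set i.toNat v
    | none => f) face

-- ===== PORT B =====
-- for i in range(4): face[i], face[8-i] = face[8-i], face[i]; return face
def face_flip_alt (face : List Int) : List Int :=
  (PySem.List.pyRange 0 4 1).foldl (fun f i =>
    match PySem.List.pyGet? f (8 - i), PySem.List.pyGet? f i with
    | some hi, some lo => (f.set i.toNat hi).set (8 - i).toNat lo
    | _, _ => f) face

-- ===== PRECONDITION & SPEC =====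
-- Both Pythons raise IndexError on lists shorter than 9 (a cube face has exactly 9 stickers).
def Pre_face_flip (face : List Int) : Prop := 9 ≤ face.length
instance (face : List Int) : Decidable (Pre_face_flip face) := by unfold Pre_face_flip; infer_instance
def pvWitness_face_flip : List Int := [1, 2, 3, 4, 5, 6, 7, 8, 9]
def Spec_face_flip (face : List Int) (out : List Int) : Prop := out = face_flip_alt face
instance (face : List Int) (out : List Int) : Decidable (Spec_face_flip face out) := by unfold Spec_face_flip; infer_instance

-- ===== CLAIM (what is proved, stated in full; the proofs are below) =====
def Claim_equal_face_flip : Prop := ∀ (face : List Int), Dom_face_flip face → Pre_face_flip face → Spec_face_flip face (face_flip face)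

-- ===== LEMMAS AND PROOFS =====
-- pyGet? on a list with at least nine explicit elements, at each literal index 0..8
lemma pvGet_1 (x0 x1 x2 x3 x4 x5 x6 x7 x8 : Int) (rest : List Int) :
    PySem.List.pyGet? (x0::x1::x2::x3::x4::x5::x6::x7::x8::rest) 1 = some x1 := by
  have h : (1:Nat) < (x0::x1::x2::x3::x4::x5::x6::x7::x8::rest).length := by simp
  have := PySem.List.pyGet?_ofNat (xs := x0::x1::x2::x3::x4::x5::x6::x7::x8::rest) (n := 1) h
  simpa using this
lemma pvGet_2 (x0 x1 x2 x3 x4 x5 x6 x7 x8 : Int) (rest : List Int) :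
    PySem.List.pyGet? (x0::x1::x2::x3::x4::x5::x6::x7::x8::rest) 2 = some x2 := by
  have h : (2:Nat) < (x0::x1::x2::x3::x4::x5::x6::x7::x8::rest).length := by simp
  have := PySem.List.pyGet?_ofNat (xs := x0::x1::x2::x3::x4::x5::x6::x7::x8::rest) (n := 2) h
  simpa using this
lemma pvGet_3 (x0 x1 x2 x3 x4 x5 x6 x7 x8 : Int) (rest : List Int) :
    PySem.List.pyGet? (x0::x1::x2::x3::x4::x5::x6::x7::x8::rest) 3 = some x3 := by
  have h : (3:Nat) < (x0::x1::x2::x3::x4::x5::x6::x7::x8::rest).length := by simp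
  have := PySem.List.pyGet?_ofNat (xs := x0::x1::x2::x3::x4::x5::x6::x7::x8::rest) (n := 3) h
  simpa using this
lemma pvGet_4 (x0 x1 x2 x3 x4 x5 x6 x7 x8 : Int) (rest : List Int) :
    PySem.List.pyGet? (x0::x1::x2::x3::x4::x5::x6::x7::x8::rest) 4 = some x4 := by
  have h : (4:Nat) < (x0::x1::x2::x3::x4::x5::x6::x7::x8::rest).length := by simp
  have := PySem.List.pyGet?_ofNat (xs := x0::x1::x2::x3::x4::x5::x6::x7::x8::rest) (n := 4) h
  simpa using this
lemma pvGet_5 (x0 x1 x2 x3 x4 x5 x6 x7 x8 : Int) (rest : List Int) :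
    PySem.List.pyGet? (x0::x1::x2::x3::x4::x5::x6::x7::x8::rest) 5 = some x5 := by
  have h : (5:Nat) < (x0::x1::x2::x3::x4::x5::x6::x7::x8::rest).length := by simp
  have := PySem.List.pyGet?_ofNat (xs := x0::x1::x2::x3::x4::x5::x6::x7::x8::rest) (n := 5) h
  simpa using this
lemma pvGet_6 (x0 x1 x2 x3 x4 x5 x6 x7 x8 : Int) (rest : List Int) :
    PySem.List.pyGet? (x0::x1::x2::x3::x4::x5::x6::x7::x8::rest) 6 = some x6 := by
  have h : (6:Nat) < (x0::x1::x2::x3::x4::x5::x6::x7::x8::rest).length := by simp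
  have := PySem.List.pyGet?_ofNat (xs := x0::x1::x2::x3::x4::x5::x6::x7::x8::rest) (n := 6) h
  simpa using this
lemma pvGet_7 (x0 x1 x2 x3 x4 x5 x6 x7 x8 : Int) (rest : List Int) :
    PySem.List.pyGet? (x0::x1::x2::x3::x4::x5::x6::x7::x8::rest) 7 = some x7 := by
  have h : (7:Nat) < (x0::x1::x2::x3::x4::x5::x6::x7::x8::rest).length := by simp
  have := PySem.List.pyGet?_ofNat (xs := x0::x1::x2::x3::x4::x5::x6::x7::x8::rest) (n := 7) h
  simpa using this
lemma pvGet_8 (x0 x1 x2 x3 x4 x5 x6 x7 x8 : Int) (rest : List Int) :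
    PySem.List.pyGet? (x0::x1::x2::x3::x4::x5::x6::x7::x8::rest) 8 = some x8 := by
  have h : (8:Nat) < (x0::x1::x2::x3::x4::x5::x6::x7::x8::rest).length := by simp
  have := PySem.List.pyGet?_ofNat (xs := x0::x1::x2::x3::x4::x5::x6::x7::x8::rest) (n := 8) h
  simpa using this


-- ===== VERDICT (by name: the statement is the Claim_ definition above) =====
theorem face_flip_spec : Claim_equal_face_flip := by
  intro face _ hpre
  unfold Pre_face_flip at hpre
  obtain ⟨a, b, c, d, e, f, g, h, i, rest, rfl⟩ :
      ∃ a b c d e f g h i rest,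
        face = a :: b :: c :: d :: e :: f :: g :: h :: i :: rest := by
    match face, hpre with
    | a :: b :: c :: d :: e :: f :: g :: h :: i :: rest, _ =>
      exact ⟨a, b, c, d, e, f, g, h, i, rest, rfl⟩
  show _ = _
  simp only [face_flip, face_flip_alt,
    show PySem.List.pyRange 0 9 1 = [0,1,2,3,4,5,6,7,8] from by decide,
    show PySem.List.pyRange 0 4 1 = [0,1,2,3] from by decide]
  simp [List.foldl, pvGet_1, pvGet_2, pvGet_3, pvGet_4, pvGet_5, pvGet_6, pvGet_7,
    pvGet_8, List.set]
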